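-- pv_equiv track=rewrite | github.com/n-claes/legolas | post_processing/pylbo/visualisation/utils.py | ef_name_to_latex
-- ===== SOURCE A (Python) =====
-- def ef_name_to_latex(
--     ef_name: str, geometry: str = "Cartesian", real_part: bool = None
-- ) -> str:
--     """
--     Converts an eigenfunction name to latex formatting. Numbers are replaced with a
--     suffix corresponding to the geometry: :math:`(1, 2, 3)` becomes :math:`(x, y, z)`
--     for Cartesian and :math:`(r, \\theta, z)` for cylindrical geometries. Symbols
--     and letters are also converted to LaTeX.
--
--     Parameters
--     ----------
--     ef_name : str
--         The name of the eigenfunction.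
--     geometry : str, optional
--         The geometry of the eigenfunction. The default is "Cartesian".
--     real_part : bool, optional
--         Whether the real part of the eigenfunction is being plotted. The default is
--         None.
--     """
--     part = ""
--     if real_part is not None:
--         part = "Re" if real_part else "Im"
--
--     if geometry == "cylindrical":
--         suffix = ("_r", r"_\theta", "_z")
--     else:
--         suffix = ("_x", "_y", "_z")
--     for i, idx in enumerate("123"):
--         ef_name = ef_name.replace(idx, suffix[i])
--
--     ef_name = ef_name.replace("rho", r"\rho")
--     ef_name = ef_name.replace("div", "\\nabla\\cdot")
--     ef_name = ef_name.replace("curl", "\\nabla\\times")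
--     ef_name = ef_name.replace("para", "\\parallel")
--     ef_name = ef_name.replace("perp", "\\perp")
--     latex_name = rf"${ef_name}$"
--     if part != "":
--         latex_name = rf"{part}({latex_name})"
--     return latex_name
-- ===== SOURCE B (Python) =====
-- _TOKENS = (
--     ("rho", "\\rho"),
--     ("div", "\\nabla\\cdot"),
--     ("curl", "\\nabla\\times"),
--     ("para", "\\parallel"),
--     ("perp", "\\perp"),
-- )
--
--
-- def _subst(s, i):
--     if i == len(_TOKENS):
--         return s
--     tok, rep = _TOKENS[i]
--     return rep.join(_subst(piece, i + 1) for piece in s.split(tok))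
--
--
-- def ef_name_to_latex(ef_name, geometry="Cartesian", real_part=None):
--     s1, s2 = ("_r", "_\\theta") if geometry == "cylindrical" else ("_x", "_y")
--     mapped = "".join(
--         s1 if c == "1" else s2 if c == "2" else "_z" if c == "3" else c
--         for c in ef_name
--     )
--     latex = f"${_subst(mapped, 0)}$"
--     if real_part is None:
--         return latex
--     return f"{'Re' if real_part else 'Im'}({latex})"
-- ===== Notes on version B (the rewrite author's own statement) =====
-- stated objective: alternative
-- what changed: B translates the digit characters in one per-character pass over the string instead of three sequential str.replace passes, and performs the five LaTeX word substitutions by a recursive split/join over a token table instead of five chained whole-string str.replace calls.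
import Mathlib
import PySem

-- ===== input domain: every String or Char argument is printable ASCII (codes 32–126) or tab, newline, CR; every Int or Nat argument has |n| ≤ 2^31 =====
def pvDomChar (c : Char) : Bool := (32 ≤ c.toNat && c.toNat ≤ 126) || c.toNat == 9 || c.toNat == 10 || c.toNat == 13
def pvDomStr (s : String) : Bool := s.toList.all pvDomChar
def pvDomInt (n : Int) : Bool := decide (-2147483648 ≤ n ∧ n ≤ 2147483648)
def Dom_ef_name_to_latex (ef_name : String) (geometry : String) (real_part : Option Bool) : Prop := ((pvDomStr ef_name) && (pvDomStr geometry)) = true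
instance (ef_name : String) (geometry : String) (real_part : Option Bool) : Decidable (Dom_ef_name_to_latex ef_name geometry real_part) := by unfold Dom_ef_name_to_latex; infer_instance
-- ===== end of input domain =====

-- B replaces A's three sequential digit `replace` passes by one per-character translation pass and
-- the five LaTeX word substitutions by a recursive split/join over a token table (objective: alternative).

-- ===== PORT A =====
def ef_name_to_latex (ef_name : String) (geometry : String) (real_part : Option Bool) : String :=
  let part : String := match real_part with
    | none => ""
    | some b => if b then "Re" else "Im"
  let suffix : List String :=
    if geometry = "cylindrical" then ["_r", "_\\theta", "_z"] else ["_x", "_y", "_z"]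
  -- for i, idx in enumerate("123"): ef_name = ef_name.replace(idx, suffix[i])
  let ef1 := (PySem.List.enumerate ['1', '2', '3']).foldl
    (fun s p => PySem.Str.replace s (String.ofList [p.2]) ((PySem.List.pyGet? suffix p.1).getD "")) ef_name
  let ef2 := PySem.Str.replace ef1 "rho" "\\rho"
  let ef3 := PySem.Str.replace ef2 "div" "\\nabla\\cdot"
  let ef4 := PySem.Str.replace ef3 "curl" "\\nabla\\times"
  let ef5 := PySem.Str.replace ef4 "para" "\\parallel"
  let ef6 := PySem.Str.replace ef5 "perp" "\\perp"
  let latex := "$" ++ ef6 ++ "$"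
  if part ≠ "" then part ++ "(" ++ latex ++ ")" else latex

-- ===== PORT B =====
-- Source B's _TOKENS table (strings kept as their character lists)
def efTokens : List (List Char × List Char) :=
  [ (['r','h','o'], ['\\','r','h','o'])
  , (['d','i','v'], ['\\','n','a','b','l','a','\\','c','d','o','t'])
  , (['c','u','r','l'], ['\\','n','a','b','l','a','\\','t','i','m','e','s'])
  , (['p','a','r','a'], ['\\','p','a','r','a','l','l','e','l'])
  , (['p','e','r','p'], ['\\','p','e','r','p']) ]

-- Source B's _subst: rep.join(_subst(piece, i+1) for piece in s.split(tok))
def efSubst : List (List Char × List Char) → List Char → List Char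
  | [], s => s
  | (tok, rep) :: ps, s =>
      PySem.Chars.join rep ((PySem.Chars.splitOn s tok).map (efSubst ps))

def ef_name_to_latex_alt (ef_name : String) (geometry : String) (real_part : Option Bool) : String :=
  let pr : String × String :=
    if geometry = "cylindrical" then ("_r", "_\\theta") else ("_x", "_y")
  let mapped := PySem.Str.join "" (ef_name.toList.map (fun c =>
    if c = '1' then pr.1 else if c = '2' then pr.2
    else if c = '3' then "_z" else String.ofList [c]))
  let latex := "$" ++ String.ofList (efSubst efTokens mapped.toList) ++ "$"
  match real_part with
  | none => latex
  | some b => (if b then "Re" else "Im") ++ "(" ++ latex ++ ")"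

-- ===== PRECONDITION & SPEC =====
def Spec_ef_name_to_latex (ef_name : String) (geometry : String) (real_part : Option Bool) (out : String) : Prop := out = ef_name_to_latex_alt ef_name geometry real_part
instance (ef_name : String) (geometry : String) (real_part : Option Bool) (out : String) : Decidable (Spec_ef_name_to_latex ef_name geometry real_part out) := by unfold Spec_ef_name_to_latex; infer_instance

-- ===== CLAIM (what is proved, stated in full; the proofs are below) =====
def Claim_equal_ef_name_to_latex : Prop := ∀ (ef_name : String) (geometry : String) (real_part : Option Bool), Dom_ef_name_to_latex ef_name geometry real_part → Spec_ef_name_to_latex ef_name geometry real_part (ef_name_to_latex ef_name geometry real_part)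

-- ===== LEMMAS AND PROOFS =====

def sRep (tok rep : List Char) (l : List Char) : List Char :=
  if _h : tok ≠ [] ∧ tok.isPrefixOf l then
    rep ++ sRep tok rep (l.drop tok.length)
  else
    match l with
    | [] => []
    | c :: cs => c :: sRep tok rep cs
termination_by l.length
decreasing_by
  · have hp : tok <+: l := by simpa using _h.2
    have h1 : 1 ≤ tok.length := by
      cases tok with
      | nil => exact absurd rfl _h.1
      | cons a t => simp
    have h2 : tok.length ≤ l.length := hp.length_le
    simp only [List.length_drop]
    omega
  · simp

theorem tok_len_pos (tok : List Char) (h : tok ≠ []) : 1 ≤ tok.length := by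
  cases tok with
  | nil => exact absurd rfl h
  | cons a t => simp

theorem repGo_eq (tok rep : List Char) (h : tok ≠ []) :
    ∀ (fuel : Nat) (l acc : List Char), l.length ≤ fuel →
      PySem.Chars.replace.go tok rep fuel l acc = acc.reverse ++ sRep tok rep l := by
  intro fuel
  induction fuel with
  | zero =>
    intro l acc hl
    have : l = [] := by
      cases l with
      | nil => rfl
      | cons c cs => simp at hl
    subst this
    rw [sRep]
    simp [PySem.Chars.replace.go]
  | succ n ih =>
    intro l acc hl
    cases l with
    | nil =>
      rw [sRep]
      simp [PySem.Chars.replace.go]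
    | cons c cs =>
      rw [PySem.Chars.replace.go]
      rw [sRep]
      by_cases hp : tok.isPrefixOf (c :: cs)
      · have hple : tok.length ≤ (c :: cs).length := by
          have : tok <+: c :: cs := by simpa using hp
          exact this.length_le
        rw [if_pos hp, dif_pos ⟨h, hp⟩, ih _ _ (by simp at hl ⊢; have := tok_len_pos tok h; omega)]
        simp
      · rw [if_neg hp, dif_neg (by simp [hp]), ih _ _ (by simp at hl ⊢; omega)]
        simp

theorem replace_eq_sRep (tok rep l : List Char) (h : tok ≠ []) :
    PySem.Chars.replace l tok rep = sRep tok rep l := by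
  rw [PySem.Chars.replace]
  rw [if_neg (by simpa using h)]
  simpa using repGo_eq tok rep h l.length l [] le_rfl

def sSplit (tok : List Char) (l : List Char) : List (List Char) :=
  if _h : tok ≠ [] ∧ tok.isPrefixOf l ∧ l ≠ [] then
    [] :: sSplit tok (l.drop tok.length)
  else
    match l with
    | [] => [[]]
    | c :: cs => (sSplit tok cs).modifyHead (c :: ·)
termination_by l.length
decreasing_by
  · have hp : tok <+: l := by simpa using _h.2.1
    have h1 : 1 ≤ tok.length := tok_len_pos tok _h.1
    have h2 : tok.length ≤ l.length := hp.length_le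
    simp only [List.length_drop]
    omega
  · simp

theorem modifyHead_self {α : Type} (xs : List α) : List.modifyHead (fun p => p) xs = xs := by
  cases xs <;> simp

theorem splitGo_eq (tok : List Char) (h : tok ≠ []) :
    ∀ (fuel : Nat) (l cur : List Char) (acc : List (List Char)), l.length ≤ fuel →
      PySem.Chars.splitOn.go tok fuel l cur acc
        = acc.reverse ++ (sSplit tok l).modifyHead (fun p => cur.reverse ++ p) := by
  intro fuel
  induction fuel with
  | zero =>
    intro l cur acc hl
    have : l = [] := by
      cases l with
      | nil => rfl
      | cons c cs => simp at hl
    subst this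
    rw [sSplit]
    simp [PySem.Chars.splitOn.go]
  | succ n ih =>
    intro l cur acc hl
    cases l with
    | nil =>
      rw [sSplit]
      simp [PySem.Chars.splitOn.go]
    | cons c cs =>
      rw [PySem.Chars.splitOn.go]
      rw [sSplit]
      by_cases hp : tok.isPrefixOf (c :: cs)
      · have hple : tok.length ≤ (c :: cs).length := by
          have : tok <+: c :: cs := by simpa using hp
          exact this.length_le
        rw [if_pos hp, dif_pos ⟨h, hp, by simp⟩,
          ih _ _ _ (by simp at hl ⊢; have := tok_len_pos tok h; omega)]
        simp [modifyHead_self]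
      · rw [if_neg hp, dif_neg (by simp [hp]), ih _ _ _ (by simp at hl ⊢; omega)]
        rw [List.modifyHead_modifyHead]
        congr 2
        funext p
        simp

theorem splitOn_eq_sSplit (tok l : List Char) (h : tok ≠ []) :
    PySem.Chars.splitOn l tok = sSplit tok l := by
  rw [PySem.Chars.splitOn, splitGo_eq tok h (l.length + 1) l [] [] (by omega)]
  simp [modifyHead_self]

theorem sSplit_ne_nil (tok l : List Char) : sSplit tok l ≠ [] := by
  rw [sSplit]
  split
  · simp
  · match l with
    | [] => simp
    | c :: cs =>
      have := sSplit_ne_nil tok cs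
      cases hsp : sSplit tok cs with
      | nil => exact absurd hsp this
      | cons x xs => simp [hsp]
termination_by l.length
decreasing_by simp

theorem join_modifyHead_cons (r : List Char) (c : Char) (parts : List (List Char))
    (h : parts ≠ []) :
    PySem.Chars.join r (parts.modifyHead (fun p => c :: p)) = c :: PySem.Chars.join r parts := by
  match parts with
  | [] => exact absurd rfl h
  | [p] => simp [PySem.Chars.join_singleton]
  | p :: q :: rest =>
    simp only [List.modifyHead]
    rw [PySem.Chars.join_cons_cons, PySem.Chars.join_cons_cons]
    simp

theorem sRep_eq_join_sSplit (tok rep l : List Char) (h : tok ≠ []) :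
    sRep tok rep l = PySem.Chars.join rep (sSplit tok l) := by
  rw [sRep, sSplit]
  by_cases hp : tok.isPrefixOf l ∧ l ≠ []
  · rw [dif_pos ⟨h, hp.1⟩, dif_pos ⟨h, hp.1, hp.2⟩]
    have ih := sRep_eq_join_sSplit tok rep (l.drop tok.length) h
    rw [ih]
    obtain ⟨x, xs, hx⟩ : ∃ x xs, sSplit tok (l.drop tok.length) = x :: xs := by
      cases hsp : sSplit tok (l.drop tok.length) with
      | nil => exact absurd hsp (sSplit_ne_nil tok _)
      | cons x xs => exact ⟨x, xs, rfl⟩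
    rw [hx, PySem.Chars.join_cons_cons]
    simp
  · match l with
    | [] =>
      rw [dif_neg (by simp), dif_neg (by simp)]
      simp [PySem.Chars.join_singleton]
    | c :: cs =>
      have hnp : ¬ tok.isPrefixOf (c :: cs) := by
        by_contra hc
        exact hp ⟨hc, by simp⟩
      rw [dif_neg (by simp [hnp]), dif_neg (by simp [hnp])]
      have ih := sRep_eq_join_sSplit tok rep cs h
      simp only []
      rw [join_modifyHead_cons rep c _ (sSplit_ne_nil tok cs), ih]
termination_by l.length
decreasing_by
  · have hpp : tok <+: l := by simpa using hp.1
    have := tok_len_pos tok h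
    have := hpp.length_le
    simp only [List.length_drop]
    omega
  · simp

def barrier (tok sepr : List Char) : Bool :=
  (!tok.isEmpty) && (!sepr.isEmpty) && (!tok.elem (sepr.headD ' ')) &&
    ((List.range sepr.length).all (fun i =>
      i == 0 || (!(tok.isPrefixOf (sepr.drop i)) && !((sepr.drop i).isPrefixOf tok))))

theorem barrier_tok_ne (tok sepr : List Char) (h : barrier tok sepr = true) : tok ≠ [] := by
  simp [barrier] at h
  exact h.1.1.1

theorem barrier_sepr_ne (tok sepr : List Char) (h : barrier tok sepr = true) : sepr ≠ [] := by
  simp [barrier] at h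
  exact h.1.1.2

theorem barrier_head_not_mem (tok sepr : List Char) (h : barrier tok sepr = true) :
    sepr.headD ' ' ∉ tok := by
  simp [barrier] at h
  simpa [List.headD_eq_head?_getD] using h.1.2

theorem barrier_drop (tok sepr : List Char) (h : barrier tok sepr = true)
    (i : Nat) (h1 : 1 ≤ i) (h2 : i < sepr.length) :
    ¬(tok <+: sepr.drop i) ∧ ¬(sepr.drop i <+: tok) := by
  simp [barrier, List.all_eq_true] at h
  rcases h.2 i h2 with h0 | hp
  · omega
  · exact ⟨by simpa [← List.isPrefixOf_iff_prefix] using hp.1,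
      by simpa [← List.isPrefixOf_iff_prefix] using hp.2⟩

theorem prefix_append_cases {α : Type} (t a b : List α) (h : t <+: a ++ b) :
    t <+: a ∨ a <+: t := by
  by_cases hl : t.length ≤ a.length
  · exact Or.inl (List.prefix_of_prefix_length_le h (a.prefix_append b) hl)
  · exact Or.inr (List.prefix_of_prefix_length_le (a.prefix_append b) h (by omega))

theorem barrier_suffix (tok sepr v : List Char) (h : barrier tok sepr = true)
    (hv : v <:+ sepr) (hne : v ≠ []) : ¬(tok <+: v) ∧ ¬(v <+: tok) := by
  obtain ⟨u, hu⟩ := hv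
  obtain ⟨c, cs, rfl⟩ : ∃ c cs, v = c :: cs := by
    cases v with
    | nil => exact absurd rfl hne
    | cons c cs => exact ⟨c, cs, rfl⟩
  by_cases hu0 : u = []
  · have hsepr : sepr = c :: cs := by rw [← hu, hu0]; rfl
    have hc_not : c ∉ tok := by
      have := barrier_head_not_mem tok sepr h
      rw [hsepr] at this
      simpa using this
    constructor
    · intro hp
      cases tok with
      | nil => exact absurd rfl (barrier_tok_ne _ _ h)
      | cons d ds =>
        rw [List.cons_prefix_cons] at hp
        exact hc_not (by simp [← hp.1])
    · intro hp
      exact hc_not (hp.mem (by simp))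
  · have hdrop : sepr.drop u.length = c :: cs := by
      rw [← hu]
      simp
    have h1le : 1 ≤ u.length := by
      cases u with
      | nil => exact absurd rfl hu0
      | cons x xs => simp
    have hlt : u.length < sepr.length := by
      rw [← hu]
      simp
    have := barrier_drop tok sepr h u.length h1le hlt
    rw [hdrop] at this
    exact this

theorem sRep_sep_append (tok rep sepr : List Char) (h : barrier tok sepr = true) :
    ∀ (u b : List Char), u <:+ sepr → sRep tok rep (u ++ b) = u ++ sRep tok rep b := by
  intro u
  induction u with
  | nil => intro b _; simp
  | cons c cs ih =>
    intro b hv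
    have hnp : ¬ tok.isPrefixOf ((c :: cs) ++ b) := by
      intro hp
      have hp' : tok <+: (c :: cs) ++ b := by simpa using hp
      rcases prefix_append_cases tok (c :: cs) b hp' with h1 | h1
      · exact (barrier_suffix tok sepr (c :: cs) h hv (by simp)).1 h1
      · exact (barrier_suffix tok sepr (c :: cs) h hv (by simp)).2 h1
    have hcs : cs <:+ sepr := by
      obtain ⟨w, hw⟩ := hv
      exact ⟨w ++ [c], by simpa using hw⟩
    rw [List.cons_append, sRep, dif_neg (by rintro ⟨_, hp⟩; exact hnp (by simpa using hp))]
    simp only []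
    rw [ih b hcs]
    simp

theorem sRep_append_barrier (tok rep sepr a b : List Char) (h : barrier tok sepr = true) :
    sRep tok rep (a ++ (sepr ++ b)) = sRep tok rep a ++ (sepr ++ sRep tok rep b) := by
  have htok := barrier_tok_ne tok sepr h
  have hsepr := barrier_sepr_ne tok sepr h
  match a with
  | [] =>
    rw [List.nil_append]
    rw [sRep_sep_append tok rep sepr h sepr b (List.suffix_refl sepr)]
    rw [(by rw [sRep]; simp [htok] : sRep tok rep [] = [])]
    simp
  | c :: a' =>
    by_cases hp : tok.isPrefixOf (c :: a')
    · -- tok matches at the head of a (hence of the whole string)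
      have hpa : tok <+: c :: a' := by simpa using hp
      have hlen := hpa.length_le
      have hpw : tok.isPrefixOf ((c :: a') ++ (sepr ++ b)) := by
        simpa using hpa.trans ((c :: a').prefix_append (sepr ++ b))
      rw [sRep, dif_pos ⟨htok, hpw⟩]
      conv_rhs => rw [sRep, dif_pos ⟨htok, hp⟩]
      rw [List.drop_append_of_le_length (by simpa using hlen)]
      rw [sRep_append_barrier tok rep sepr (List.drop tok.length (c :: a')) b h]
      simp
    · -- no match at head: tok cannot match the whole string at the head either
      have hnw : ¬ tok.isPrefixOf ((c :: a') ++ (sepr ++ b)) := by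
        intro hw
        have hw' : tok <+: (c :: a') ++ (sepr ++ b) := by simpa using hw
        rcases prefix_append_cases tok (c :: a') (sepr ++ b) hw' with h1 | h1
        · exact hp (by simpa [List.isPrefixOf_iff_prefix] using h1)
        · -- a <+: tok and tok extends into sepr: sepr.head ∈ tok, contradiction
          obtain ⟨t2, ht2⟩ := h1
          have ht2ne : t2 ≠ [] := by
            intro hz
            rw [hz, List.append_nil] at ht2
            exact hp (by simp [← ht2, List.isPrefixOf_iff_prefix])
          have ht2p : t2 <+: sepr ++ b := by
            have := hw'
            rw [← ht2] at this
            exact (List.prefix_append_right_inj (c :: a')).mp this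
          obtain ⟨d, ds, rfl⟩ : ∃ d ds, t2 = d :: ds := by
            cases t2 with
            | nil => exact absurd rfl ht2ne
            | cons d ds => exact ⟨d, ds, rfl⟩
          have hd : d = sepr.headD ' ' := by
            obtain ⟨e, es, rfl⟩ : ∃ e es, sepr = e :: es := by
              cases sepr with
              | nil => exact absurd rfl hsepr
              | cons e es => exact ⟨e, es, rfl⟩
            have := ht2p
            rw [List.cons_append, List.cons_prefix_cons] at this
            simp [this.1]
          apply barrier_head_not_mem tok sepr h
          rw [← hd]
          have : d ∈ tok := by
            rw [← ht2]
            simp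
          exact this
      rw [List.cons_append, sRep, dif_neg (by rintro ⟨_, hq⟩; exact hnw (by simpa using hq))]
      simp only []
      conv_rhs => rw [sRep, dif_neg (by rintro ⟨_, hq⟩; exact hp hq)]
      simp only []
      rw [sRep_append_barrier tok rep sepr a' b h]
      simp
termination_by a.length
decreasing_by
  · have := tok_len_pos tok htok
    simp only [List.length_drop]
    have := hlen
    simp at this ⊢
    omega
  · simp

theorem sRep_join_barrier (tok rep sepr : List Char) (h : barrier tok sepr = true) :
    ∀ (parts : List (List Char)), parts ≠ [] →
    sRep tok rep (PySem.Chars.join sepr parts)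
      = PySem.Chars.join sepr (parts.map (sRep tok rep)) := by
  intro parts
  induction parts with
  | nil => intro hp; exact absurd rfl hp
  | cons p ps ih =>
    intro _
    cases ps with
    | nil => simp [PySem.Chars.join_singleton]
    | cons q rest =>
      rw [PySem.Chars.join_cons_cons, List.append_assoc,
        sRep_append_barrier tok rep sepr p _ h, ih (by simp),
        List.map_cons]
      simp [PySem.Chars.join_cons_cons, List.append_assoc]

def wordSeq (ps : List (List Char × List Char)) (s : List Char) : List Char :=
  ps.foldl (fun s p => sRep p.1 p.2 s) s

theorem wordSeq_join (ps : List (List Char × List Char)) (sepr : List Char)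
    (hb : ∀ p ∈ ps, barrier p.1 sepr = true) :
    ∀ (parts : List (List Char)), parts ≠ [] →
    wordSeq ps (PySem.Chars.join sepr parts)
      = PySem.Chars.join sepr (parts.map (wordSeq ps)) := by
  induction ps with
  | nil =>
    intro parts _
    have hmap : parts.map (wordSeq []) = parts.map id := List.map_congr_left fun x _ => rfl
    simp [wordSeq, hmap]
  | cons p ps ih =>
    intro parts hp
    simp only [wordSeq, List.foldl_cons]
    have h1 := sRep_join_barrier p.1 p.2 sepr (hb p (by simp)) parts hp
    rw [show (List.foldl (fun s q => sRep q.1 q.2 s) (sRep p.1 p.2 (PySem.Chars.join sepr parts)) ps) = wordSeq ps (sRep p.1 p.2 (PySem.Chars.join sepr parts)) from rfl]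
    rw [h1, ih (fun q hq => hb q (by simp [hq])) _ (by simpa using hp)]
    simp [List.map_map]
    rfl

def goodToks : List (List Char × List Char) → Bool
  | [] => true
  | (t, r) :: ps => (!t.isEmpty) && ps.all (fun q => barrier q.1 r) && goodToks ps

theorem efSubst_eq_wordSeq (ps : List (List Char × List Char)) (hg : goodToks ps = true) :
    ∀ s : List Char, efSubst ps s = wordSeq ps s := by
  induction ps with
  | nil => intro s; rfl
  | cons p ps ih =>
    intro s
    obtain ⟨tok, rep⟩ := p
    simp only [goodToks, Bool.and_eq_true] at hg
    have htok : tok ≠ [] := by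
      have := hg.1.1
      simpa using this
    have hall : ∀ q ∈ ps, barrier q.1 rep = true := by
      have := hg.1.2
      simpa [List.all_eq_true] using this
    have hgps := hg.2
    simp only [efSubst]
    rw [splitOn_eq_sSplit tok s htok]
    rw [List.map_congr_left (fun x _ => ih hgps x)]
    rw [← wordSeq_join ps rep hall (sSplit tok s) (sSplit_ne_nil tok s)]
    rw [← sRep_eq_join_sSplit tok rep s htok]
    rfl

theorem sRep_singleton (c : Char) (r : List Char) : ∀ l : List Char,
    sRep [c] r l = l.flatMap (fun d => if d = c then r else [d]) := by
  intro l
  induction l with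
  | nil => rw [sRep]; simp
  | cons d ds ih =>
    rw [sRep]
    by_cases hd : d = c
    · rw [dif_pos ⟨by simp, by simp [hd, List.isPrefixOf]⟩]
      simp [hd, ih]
    · rw [dif_neg (by rintro ⟨_, hq⟩; simp [List.isPrefixOf] at hq; exact hd hq.symm)]
      simp [hd, ih]

theorem flatMap_id_of_ne (c : Char) (r : List Char) : ∀ a : List Char, (c ∉ a) →
    a.flatMap (fun d => if d = c then r else [d]) = a := by
  intro a
  induction a with
  | nil => intro _; simp
  | cons d ds ih =>
    intro hm
    simp only [List.flatMap_cons]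
    rw [if_neg (by intro hd; exact hm (by simp [hd]))]
    rw [ih (by intro hd; exact hm (by simp [hd]))]
    simp

theorem join_nil_flatten : ∀ parts : List (List Char),
    PySem.Chars.join [] parts = parts.flatten := by
  intro parts
  induction parts with
  | nil => simp [PySem.Chars.join_nil]
  | cons p ps ih =>
    cases ps with
    | nil => simp [PySem.Chars.join_singleton]
    | cons q rest =>
      rw [PySem.Chars.join_cons_cons, ih]
      simp

theorem digit_chain (A1 A2 A3 : List Char)
    (h21 : '2' ∉ A1) (h31 : '3' ∉ A1) (h32 : '3' ∉ A2) (l : List Char) :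
    (((l.flatMap (fun d => if d = '1' then A1 else [d])).flatMap
        (fun d => if d = '2' then A2 else [d])).flatMap
        (fun d => if d = '3' then A3 else [d]))
      = l.flatMap (fun c => if c = '1' then A1 else if c = '2' then A2
          else if c = '3' then A3 else [c]) := by
  rw [List.flatMap_assoc, List.flatMap_assoc]
  apply List.flatMap_congr
  intro d _
  by_cases h1 : d = '1'
  · have hA1 : ∀ x ∈ A1, (List.flatMap (fun d => if d = '3' then A3 else [d])
        (if x = '2' then A2 else [x])) = [x] := by
      intro x hx
      rw [if_neg (by intro hz; rw [hz] at hx; exact h21 hx)]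
      simp only [List.flatMap_cons, List.flatMap_nil]
      rw [if_neg (by intro hz; rw [hz] at hx; exact h31 hx)]
      simp
    subst h1
    simp only [reduceIte]
    rw [List.flatMap_congr hA1, List.flatMap_singleton' A1]
    try simp
  · by_cases h2 : d = '2'
    · subst h2
      simpa using flatMap_id_of_ne '3' A3 A2 h32
    · by_cases h3 : d = '3'
      · simp [h3]
      · simp [h1, h2, h3]

theorem core_eq (el : List Char) (S1 S2 : List Char)
    (h21 : '2' ∉ S1) (h31 : '3' ∉ S1) (h32 : '3' ∉ S2) :
    sRep ['p','e','r','p'] ['\\','p','e','r','p']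
      (sRep ['p','a','r','a'] ['\\','p','a','r','a','l','l','e','l']
        (sRep ['c','u','r','l'] ['\\','n','a','b','l','a','\\','t','i','m','e','s']
          (sRep ['d','i','v'] ['\\','n','a','b','l','a','\\','c','d','o','t']
            (sRep ['r','h','o'] ['\\','r','h','o']
              (sRep ['3'] ['_','z'] (sRep ['2'] S2 (sRep ['1'] S1 el)))))))
      = efSubst efTokens (el.flatMap (fun c =>
          if c = '1' then S1 else if c = '2' then S2 else if c = '3' then ['_','z'] else [c])) := by
  rw [sRep_singleton, sRep_singleton, sRep_singleton,
    digit_chain S1 S2 ['_','z'] h21 h31 h32 el]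
  rw [efSubst_eq_wordSeq efTokens (by decide)]
  rfl

theorem body_eq (e : String) (S1 S2 : String)
    (h21 : '2' ∉ S1.toList) (h31 : '3' ∉ S1.toList) (h32 : '3' ∉ S2.toList) :
    PySem.Str.replace (PySem.Str.replace (PySem.Str.replace (PySem.Str.replace
      (PySem.Str.replace ((PySem.List.enumerate ['1', '2', '3']).foldl
        (fun s p => PySem.Str.replace s (String.ofList [p.2])
          ((PySem.List.pyGet? [S1, S2, "_z"] p.1).getD "")) e)
        "rho" "\\rho") "div" "\\nabla\\cdot") "curl" "\\nabla\\times")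
        "para" "\\parallel") "perp" "\\perp"
      = String.ofList (efSubst efTokens (PySem.Str.join "" (e.toList.map (fun c =>
          if c = '1' then S1 else if c = '2' then S2
          else if c = '3' then "_z" else String.ofList [c]))).toList) := by
  apply String.toList_inj.mp
  -- unroll the enumerate-foldl into three replace calls
  rw [show PySem.List.enumerate ['1','2','3'] = [((0:Int),'1'),(1,'2'),(2,'3')] from by decide]
  simp only [List.foldl_cons, List.foldl_nil]
  rw [show (PySem.List.pyGet? [S1, S2, ("_z":String)] (0:Int)).getD "" = S1 from by
        simp [PySem.List.pyGet?, PySem.List.pyIdx?],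
      show (PySem.List.pyGet? [S1, S2, ("_z":String)] (1:Int)).getD "" = S2 from by
        simp [PySem.List.pyGet?, PySem.List.pyIdx?],
      show (PySem.List.pyGet? [S1, S2, ("_z":String)] (2:Int)).getD "" = ("_z":String) from by
        simp [PySem.List.pyGet?, PySem.List.pyIdx?]]
  -- move to the character-list level
  simp only [PySem.Str.toList_replace, String.toList_ofList]
  rw [show ("rho":String).toList = ['r','h','o'] from by decide,
      show ("\\rho":String).toList = ['\\','r','h','o'] from by decide,
      show ("div":String).toList = ['d','i','v'] from by decide,
      show ("\\nabla\\cdot":String).toList = ['\\','n','a','b','l','a','\\','c','d','o','t'] from by decide,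
      show ("curl":String).toList = ['c','u','r','l'] from by decide,
      show ("\\nabla\\times":String).toList = ['\\','n','a','b','l','a','\\','t','i','m','e','s'] from by decide,
      show ("para":String).toList = ['p','a','r','a'] from by decide,
      show ("\\parallel":String).toList = ['\\','p','a','r','a','l','l','e','l'] from by decide,
      show ("perp":String).toList = ['p','e','r','p'] from by decide,
      show ("\\perp":String).toList = ['\\','p','e','r','p'] from by decide,
      show ("_z":String).toList = ['_','z'] from by decide]
  rw [replace_eq_sRep _ _ _ (by decide), replace_eq_sRep _ _ _ (by decide),
      replace_eq_sRep _ _ _ (by decide), replace_eq_sRep _ _ _ (by decide),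
      replace_eq_sRep _ _ _ (by decide), replace_eq_sRep _ _ _ (by decide),
      replace_eq_sRep _ _ _ (by decide), replace_eq_sRep _ _ _ (by decide)]
  rw [core_eq e.toList S1.toList S2.toList h21 h31 h32]
  -- the B side: (join "" …).toList is the flatMap of the per-character map
  congr 1
  rw [PySem.Str.toList_join]
  rw [show ("":String).toList = [] from by decide]
  rw [join_nil_flatten, List.map_map]
  rw [show ((e.toList.map (String.toList ∘ fun c =>
        if c = '1' then S1 else if c = '2' then S2
        else if c = '3' then "_z" else String.ofList [c])).flatten
      = e.toList.flatMap (String.toList ∘ fun c =>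
        if c = '1' then S1 else if c = '2' then S2
        else if c = '3' then "_z" else String.ofList [c])) from rfl]
  apply List.flatMap_congr
  intro c _
  by_cases h1 : c = '1'
  · simp [h1]
  · by_cases h2 : c = '2'
    · simp [h2]
    · by_cases h3 : c = '3'
      · simp [h3]
      · simp [h1, h2, h3]

-- ===== VERDICT (by name: the statement is the Claim_ definition above) =====
theorem ef_name_to_latex_spec : Claim_equal_ef_name_to_latex := by
  unfold Claim_equal_ef_name_to_latex
  intro e g r _
  unfold Spec_ef_name_to_latex ef_name_to_latex ef_name_to_latex_alt
  by_cases hg : g = "cylindrical"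
  · simp only [hg, ite_true]
    rw [body_eq e "_r" "_\\theta" (by decide) (by decide) (by decide)]
    match r with
    | none => simp
    | some true => simp
    | some false => simp
  · simp only [if_neg hg]
    
    rw [body_eq e "_x" "_y" (by decide) (by decide) (by decide)]
    match r with
    | none => simp
    | some true => simp
    | some false => simp
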